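-- pv_equiv track=rewrite | github.com/Houtmann/MathAttaquePollard | webapp/math/utils.py | powTwo
-- ===== SOURCE A (Python) =====
-- def powTwo(x):
--     powers = []
--     i = 1
--     while i <= x:
--         if i & x:
--             powers.append(i)
--         i <<= 1
--     return powers
-- ===== SOURCE B (Python) =====
-- def powTwo(x):
--     if x < 1:
--         return []
--     rest = [2 * p for p in powTwo(x // 2)]
--     return [1] + rest if x % 2 else rest
-- ===== Notes on version B (the rewrite author's own statement) =====
-- stated objective: alternative
-- what changed: Recursive halving (build the powers of x//2 and double them, prepending 1 when x is odd) instead of an iterative doubling scan over bit positions with an accumulator list.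
import Mathlib
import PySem

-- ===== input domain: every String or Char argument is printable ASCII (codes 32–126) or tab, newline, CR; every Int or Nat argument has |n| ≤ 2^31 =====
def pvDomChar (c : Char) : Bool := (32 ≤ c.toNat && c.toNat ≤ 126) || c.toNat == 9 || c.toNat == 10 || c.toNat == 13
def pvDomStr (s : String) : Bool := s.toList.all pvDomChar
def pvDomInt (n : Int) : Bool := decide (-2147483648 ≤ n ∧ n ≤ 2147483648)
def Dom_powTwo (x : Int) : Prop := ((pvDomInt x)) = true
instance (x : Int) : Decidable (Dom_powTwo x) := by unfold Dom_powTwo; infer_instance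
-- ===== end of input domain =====

-- B re-implements the same function by recursive halving instead of A's iterative doubling scan; return values are proved equal on all ints.

-- ===== PORT A =====
-- while i <= x: if i & x: powers.append(i); i <<= 1
-- (Int has no `&&&` notation here; Int.land is exactly Python's `&` on ints.)
def powTwoLoopA (x i : Int) (acc : List Int) (hi : 1 ≤ i) : List Int :=
  if _h : i ≤ x then
    powTwoLoopA x (i * 2) (if Int.land i x ≠ 0 then acc ++ [i] else acc) (by omega)
  else acc
termination_by (x + 1 - i).toNat
decreasing_by omega

def powTwo (x : Int) : List Int := powTwoLoopA x 1 [] (by norm_num)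

-- ===== PORT B =====
def powTwo_alt (x : Int) : List Int :=
  if _h : x < 1 then []
  else
    let rest := (powTwo_alt (PySem.Int.floordiv x 2)).map (fun p => 2 * p)
    if PySem.Int.mod x 2 ≠ 0 then 1 :: rest else rest
termination_by x.toNat
decreasing_by
  rw [PySem.Int.floordiv_eq_ediv_of_pos (by norm_num)]; omega

-- ===== PRECONDITION & SPEC =====
def Spec_powTwo (x : Int) (out : List Int) : Prop := out = powTwo_alt x
instance (x : Int) (out : List Int) : Decidable (Spec_powTwo x out) := by unfold Spec_powTwo; infer_instance

-- ===== CLAIM (what is proved, stated in full; the proofs are below) =====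
def Claim_equal_powTwo : Prop := ∀ (x : Int), Dom_powTwo x → Spec_powTwo x (powTwo x)

-- ===== LEMMAS AND PROOFS =====

-- accumulator comes out front
theorem loopA_acc : ∀ (n : Nat) (x i : Int) (acc : List Int) (hi : 1 ≤ i),
    (x + 1 - i).toNat ≤ n → powTwoLoopA x i acc hi = acc ++ powTwoLoopA x i [] hi := by
  intro n
  induction n with
  | zero =>
    intro x i acc hi hn
    conv_lhs => rw [powTwoLoopA]
    conv_rhs => rw [powTwoLoopA]
    rw [dif_neg (by omega), dif_neg (by omega)]
    simp
  | succ n ih =>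
    intro x i acc hi hn
    conv_lhs => rw [powTwoLoopA]
    conv_rhs => rw [powTwoLoopA]
    by_cases h : i ≤ x
    · rw [dif_pos h, dif_pos h]
      by_cases hc : Int.land i x ≠ 0
      · rw [if_pos hc, if_pos hc, ih x (i*2) (acc ++ [i]) (by omega) (by omega),
            ih x (i*2) ([] ++ [i]) (by omega) (by omega)]
        simp
      · rw [if_neg hc, if_neg hc, ih x (i*2) acc (by omega) (by omega)]
    · rw [dif_neg h, dif_neg h]; simp

-- the two's-complement-free core fact: shifting the probe up one bit = probing the halved number
theorem nat_land_two_mul (a b : Nat) : (2*a) &&& b = 2 * (a &&& b/2) := by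
  apply Nat.eq_of_testBit_eq; intro k
  have h2 : ∀ x : Nat, 2*x/2 = x := fun x => by omega
  cases k with
  | zero => simp
  | succ k => rw [Nat.testBit_land]; simp [Nat.testBit_add_one, h2]

theorem int_land_cast (m n : Nat) : Int.land (m : Int) (n : Int) = ((m &&& n : Nat) : Int) := rfl

theorem int_land_double (x i : Int) (hx : 0 ≤ x) (hi : 1 ≤ i) :
    Int.land (i * 2) x = 2 * Int.land i (x / 2) := by
  obtain ⟨m, rfl⟩ : ∃ m : Nat, i = (m : Int) := ⟨i.toNat, by omega⟩
  obtain ⟨k, rfl⟩ : ∃ k : Nat, x = (k : Int) := ⟨x.toNat, by omega⟩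
  have e1 : (m : Int) * 2 = ((2 * m : Nat) : Int) := by push_cast; ring
  have e2 : (k : Int) / 2 = ((k / 2 : Nat) : Int) := by push_cast; rfl
  rw [e1, e2, int_land_cast, int_land_cast, nat_land_two_mul]
  push_cast; ring

theorem int_land_one (x : Int) (hx : 0 ≤ x) : Int.land 1 x = x % 2 := by
  obtain ⟨k, rfl⟩ : ∃ k : Nat, x = (k : Int) := ⟨x.toNat, by omega⟩
  have : Int.land ((1:Nat) : Int) (k : Int) = (((1:Nat) &&& k : Nat) : Int) := int_land_cast 1 k
  rw [show (1:Int) = ((1:Nat) : Int) from rfl, this, Nat.land_comm, Nat.and_one_is_mod]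
  push_cast; rfl

-- scaling: scanning x from probe 2i = twice the scan of x/2 from probe i
theorem loopA_scale : ∀ (n : Nat) (x i : Int) (hx : 0 ≤ x) (hi : 1 ≤ i)
    (h2 : 1 ≤ i * 2), (x + 1 - i*2).toNat ≤ n →
    powTwoLoopA x (i*2) [] h2 = (powTwoLoopA (x/2) i [] hi).map (fun p => 2 * p) := by
  intro n
  induction n with
  | zero =>
    intro x i hx hi h2 hn
    conv_lhs => rw [powTwoLoopA]
    conv_rhs => rw [powTwoLoopA]
    rw [dif_neg (by omega), dif_neg (by omega)]
    simp
  | succ n ih =>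
    intro x i hx hi h2 hn
    conv_lhs => rw [powTwoLoopA]
    conv_rhs => rw [powTwoLoopA]
    by_cases h : i * 2 ≤ x
    · rw [dif_pos h, dif_pos (by omega : i ≤ x / 2)]
      rw [loopA_acc ((x+1-i*2*2).toNat) x (i*2*2) _ (by omega) (le_refl _),
          loopA_acc ((x/2+1-i*2).toNat) (x/2) (i*2) _ (by omega) (le_refl _)]
      rw [ih x (i*2) hx (by omega) (by omega) (by omega)]
      have hb := int_land_double x i hx hi
      by_cases hc : Int.land i (x/2) ≠ 0
      · rw [if_pos (by rw [hb]; omega), if_pos hc]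
        simp [mul_comm]
      · rw [if_neg (by rw [hb]; omega), if_neg hc]
        simp
    · rw [dif_neg h, dif_neg (by omega : ¬ i ≤ x / 2)]
      simp

theorem powTwo_eq_alt : ∀ (n : Nat) (x : Int), x.toNat ≤ n → powTwo x = powTwo_alt x := by
  intro n
  induction n with
  | zero =>
    intro x hn
    rw [powTwo, powTwoLoopA, powTwo_alt]
    rw [dif_neg (by omega), dif_pos (by omega)]
  | succ n ih =>
    intro x hn
    by_cases hx : x < 1
    · rw [powTwo, powTwoLoopA, powTwo_alt]
      rw [dif_neg (by omega), dif_pos hx]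
    · rw [powTwo, powTwoLoopA, powTwo_alt, dif_pos (by omega : (1:Int) ≤ x), dif_neg hx]
      rw [loopA_acc ((x+1-1*2).toNat) x (1*2) _ (by omega) (le_refl _)]
      rw [loopA_scale ((x+1-1*2).toNat) x 1 (by omega) (by omega) (by omega) (le_refl _)]
      rw [show powTwoLoopA (x/2) 1 [] (by omega) = powTwo (x/2) from rfl]
      rw [ih (x/2) (by omega)]
      rw [PySem.Int.floordiv_eq_ediv_of_pos (by norm_num),
          PySem.Int.mod_eq_emod_of_pos (by norm_num)]
      have h1 : Int.land 1 x = x % 2 := int_land_one x (by omega)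
      by_cases hc : x % 2 ≠ 0
      · rw [if_pos (by rw [h1]; exact hc), if_pos hc]; simp
      · rw [if_neg (by rw [h1]; exact hc), if_neg hc]; simp

-- ===== VERDICT (by name: the statement is the Claim_ definition above) =====
theorem powTwo_spec : Claim_equal_powTwo := by
  intro x _
  unfold Spec_powTwo
  exact powTwo_eq_alt x.toNat x (le_refl _)
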